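-- pv_equiv track=rewrite | github.com/elimanzo/leetcode | 2574-left-and-right-sum-differences/solution.py | solution0
-- ===== SOURCE A (Python) =====
-- from typing import List
--
-- def solution0(nums: List[int]) -> List[int]:
--     leftSum = [0]
--     rightSum = [sum(nums) - nums[0]]
--     res = [abs(leftSum[0] - rightSum[0])]
--
--     for i in range(1, len(nums)):
--         leftSum.append(leftSum[i - 1] + nums[i - 1])
--         rightSum.append(rightSum[i - 1] - nums[i])
--         res.append(abs(leftSum[i] - rightSum[i]))
--
--     return res
-- ===== SOURCE B (Python) =====
-- def solution0(nums):
--     total = sum(nums)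
--     out = []
--     right = 0
--     for x in reversed(nums):
--         out.append(abs(total - x - 2 * right))
--         right += x
--     out.reverse()
--     return out
-- ===== Notes on version B (the rewrite author's own statement) =====
-- stated objective: alternative
-- what changed: Traverses the list in REVERSE with a single scalar suffix (right) sum, builds the answer back-to-front via |left-right| = |total - x - 2*right| and reverses it once, instead of A's forward pass that grows two prefix/suffix arrays with index arithmetic.
-- outside the precondition, e.g. on solution0([]): A raises IndexError, B returns []
import Mathlib
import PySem

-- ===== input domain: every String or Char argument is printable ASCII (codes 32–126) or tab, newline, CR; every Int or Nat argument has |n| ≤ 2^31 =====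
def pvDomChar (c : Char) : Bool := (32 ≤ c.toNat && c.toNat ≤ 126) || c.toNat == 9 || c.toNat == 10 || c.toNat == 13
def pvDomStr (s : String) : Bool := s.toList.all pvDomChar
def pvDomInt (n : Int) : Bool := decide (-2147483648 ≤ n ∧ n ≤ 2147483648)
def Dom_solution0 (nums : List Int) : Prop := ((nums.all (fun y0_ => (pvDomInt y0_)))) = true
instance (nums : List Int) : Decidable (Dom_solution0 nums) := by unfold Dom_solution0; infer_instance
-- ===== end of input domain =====

-- B traverses the list in reverse with one scalar suffix sum, building the answer
-- back-to-front via |left-right| = |total - x - 2*right|, instead of A's forward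
-- pass that grows two prefix/suffix arrays. Return value only; neither mutates its argument.

-- ===== PORT A =====
-- the for-loop of A: i runs over range(1, len(nums)); state = (leftSum, rightSum, res) arrays
def solution0Loop (nums : List Int) (n i : Nat) (ls rs res : List Int) : List Int :=
  if i < n then
    let ls' := ls ++ [ls.getD (i - 1) 0 + nums.getD (i - 1) 0]
    let rs' := rs ++ [rs.getD (i - 1) 0 - nums.getD i 0]
    solution0Loop nums n (i + 1) ls' rs' (res ++ [|ls'.getD i 0 - rs'.getD i 0|])
  else res
termination_by n - i

def solution0 (nums : List Int) : List Int :=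
  match nums with
  | [] => []   -- unreachable under Pre_solution0 (Python raises IndexError at nums[0])
  | n0 :: _ =>
    let ls : List Int := [0]
    let rs : List Int := [nums.foldl (· + ·) 0 - n0]
    let res : List Int := [|ls.getD 0 0 - rs.getD 0 0|]
    solution0Loop nums nums.length 1 ls rs res

-- ===== PORT B =====
-- B's for-loop: fold over reversed(nums), state = (out, right); then out is reversed
def solution0_alt (nums : List Int) : List Int :=
  let total := nums.foldl (· + ·) 0
  let p := nums.reverse.foldl
    (fun (p : List Int × Int) x => (p.1 ++ [|total - x - 2 * p.2|], p.2 + x)) ([], 0)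
  p.1.reverse

-- ===== PRECONDITION & SPEC =====
-- Pre_ excludes only the empty list, on which A raises IndexError (nums[0]).
def Pre_solution0 (nums : List Int) : Prop := nums ≠ []
instance (nums : List Int) : Decidable (Pre_solution0 nums) := by unfold Pre_solution0; infer_instance
def pvWitness_solution0 : List Int := ([1, -2, 3] : List Int)

def Spec_solution0 (nums : List Int) (out : List Int) : Prop := out = solution0_alt nums
instance (nums : List Int) (out : List Int) : Decidable (Spec_solution0 nums out) := by unfold Spec_solution0; infer_instance

-- ===== CLAIM (what is proved, stated in full; the proofs are below) =====
def Claim_equal_solution0 : Prop := ∀ (nums : List Int), Dom_solution0 nums → Pre_solution0 nums → Spec_solution0 nums (solution0 nums)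

-- ===== LEMMAS AND PROOFS =====

-- forward characterisation used to connect the two loops:
-- pvFwd total left xs = [|total - x - 2*left_x|] with left_x the running prefix sum
def pvFwd (total left : Int) : List Int → List Int
  | [] => []
  | x :: xs => |total - x - 2 * left| :: pvFwd total (left + x) xs

-- prefix sum of the first i elements
def pvPre (nums : List Int) (i : Nat) : Int := (nums.take i).foldl (· + ·) 0

lemma pvPre_succ (nums : List Int) (i : Nat) (h : i < nums.length) :
    pvPre nums (i + 1) = pvPre nums i + nums.getD i 0 := by
  unfold pvPre
  rw [List.take_add_one, List.foldl_append]
  simp [List.getElem?_eq_getElem h, List.getD]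

lemma getD_append_last (ls : List Int) (a : Int) :
    (ls ++ [a]).getD ls.length 0 = a := by
  simp [List.getD]

lemma foldl_add_shift (xs : List Int) (a : Int) :
    xs.foldl (· + ·) a = a + xs.foldl (· + ·) 0 := by
  induction xs generalizing a with
  | nil => simp
  | cons x t ih => simp only [List.foldl]; rw [ih (a + x), ih (0 + x)]; ring

-- A's loop from index i produces pvFwd on the i-th suffix
lemma solution0Loop_eq (nums : List Int) (i : Nat) (ls rs res : List Int)
    (h1 : 1 ≤ i)
    (hls : ls.length = i) (hrs : rs.length = i)
    (hlsv : ls.getD (i - 1) 0 = pvPre nums (i - 1))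
    (hrsv : rs.getD (i - 1) 0 = nums.foldl (· + ·) 0 - pvPre nums i) :
    solution0Loop nums nums.length i ls rs res
      = res ++ pvFwd (nums.foldl (· + ·) 0) (pvPre nums i) (nums.drop i) := by
  by_cases h : i < nums.length
  · rw [solution0Loop, if_pos h]
    have hdrop : nums.drop i = nums.getD i 0 :: nums.drop (i + 1) := by
      rw [List.drop_eq_getElem_cons h, List.getD, List.getElem?_eq_getElem h]; rfl
    have hsub : i - 1 + 1 = i := Nat.succ_pred_eq_of_pos h1
    have hi1 : i - 1 < nums.length := lt_of_le_of_lt (Nat.pred_le i) h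
    have hlsv' : (ls ++ [ls.getD (i - 1) 0 + nums.getD (i - 1) 0]).getD i 0 = pvPre nums i := by
      rw [← hls, getD_append_last, hls, hlsv, ← pvPre_succ nums (i - 1) hi1, hsub]
    have hrsv' : (rs ++ [rs.getD (i - 1) 0 - nums.getD i 0]).getD i 0
        = nums.foldl (· + ·) 0 - pvPre nums (i + 1) := by
      rw [← hrs, getD_append_last, hrs, hrsv, pvPre_succ nums i h]; ring
    have hrec := solution0Loop_eq nums (i + 1)
        (ls ++ [ls.getD (i - 1) 0 + nums.getD (i - 1) 0])
        (rs ++ [rs.getD (i - 1) 0 - nums.getD i 0])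
        (res ++ [|(ls ++ [ls.getD (i - 1) 0 + nums.getD (i - 1) 0]).getD i 0
                  - (rs ++ [rs.getD (i - 1) 0 - nums.getD i 0]).getD i 0|])
        (le_trans h1 (Nat.le_succ i))
        (by simp [hls]) (by simp [hrs]) hlsv' hrsv'
    rw [hrec, hdrop, pvFwd]
    have habs : |(ls ++ [ls.getD (i - 1) 0 + nums.getD (i - 1) 0]).getD i 0
        - (rs ++ [rs.getD (i - 1) 0 - nums.getD i 0]).getD i 0|
        = |nums.foldl (· + ·) 0 - nums.getD i 0 - 2 * pvPre nums i| := by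
      rw [hlsv', hrsv', pvPre_succ nums i h, ← abs_neg]; ring_nf
    rw [habs, ← pvPre_succ nums i h]
    simp
  · rw [solution0Loop, if_neg h]
    rw [List.drop_eq_nil_of_le (le_of_not_gt h)]
    simp [pvFwd]
termination_by nums.length - i

-- B's reversed fold, reversed back, is pvFwd (when left + sum xs + right = total)
lemma solution0AltFold_eq (total : Int) (xs : List Int) (acc : List Int) (s0 L0 : Int)
    (h : L0 + xs.foldl (· + ·) 0 + s0 = total) :
    xs.reverse.foldl
      (fun (p : List Int × Int) x => (p.1 ++ [|total - x - 2 * p.2|], p.2 + x)) (acc, s0)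
    = (acc ++ (pvFwd total L0 xs).reverse, s0 + xs.foldl (· + ·) 0) := by
  induction xs generalizing acc s0 L0 with
  | nil => simp [pvFwd]
  | cons x t ih =>
    have hsum : (x :: t).foldl (· + ·) 0 = x + t.foldl (· + ·) 0 := by
      simp only [List.foldl]; rw [foldl_add_shift t (0 + x)]; ring
    have ih' := ih acc s0 (L0 + x) (by rw [hsum] at h; linarith)
    rw [List.reverse_cons, List.foldl_append, ih']
    have hneg : total - x - 2 * (s0 + t.foldl (· + ·) 0) = -(total - x - 2 * L0) := by
      rw [hsum] at h; linarith
    simp only [List.foldl, pvFwd, List.reverse_cons, Prod.mk.injEq]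
    rw [hneg, abs_neg]
    refine ⟨by simp [List.append_assoc], ?_⟩
    rw [foldl_add_shift t (0 + x)]; ring

-- ===== VERDICT (by name: the statement is the Claim_ definition above) =====
theorem solution0_spec : Claim_equal_solution0 := by
  intro nums _ hpre
  unfold Spec_solution0
  have halt : solution0_alt nums = pvFwd (nums.foldl (· + ·) 0) 0 nums := by
    show ((nums.reverse.foldl
        (fun (p : List Int × Int) x =>
          (p.1 ++ [|nums.foldl (· + ·) 0 - x - 2 * p.2|], p.2 + x)) ([], 0)).1).reverse = _
    rw [solution0AltFold_eq (nums.foldl (· + ·) 0) nums [] 0 0 (by ring)]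
    simp
  rw [halt]
  match nums, hpre with
  | n0 :: rest, _ =>
    have h0 : solution0 (n0 :: rest)
        = solution0Loop (n0 :: rest) (n0 :: rest).length 1 [0]
            [(n0 :: rest).foldl (· + ·) 0 - n0]
            [|(0 : Int) - ((n0 :: rest).foldl (· + ·) 0 - n0)|] := by
      simp [solution0, List.getD]
    rw [h0, solution0Loop_eq (n0 :: rest) 1 _ _ _ le_rfl rfl rfl
        (by simp [pvPre]) (by simp [pvPre, List.getD])]
    have h1 : pvPre (n0 :: rest) 1 = n0 := by simp [pvPre]
    rw [h1]
    rw [pvFwd]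
    simp [abs_sub_comm]
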